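-- pv_equiv track=rewrite | github.com/MissMuffin/sequence_tagging | model/data_utils.py | pad_chars
-- ===== SOURCE A (Python) =====
-- def pad_chars(charss_ids, pad_tok=0):
--     """
--     Args:
--         charss_ids: the sentences with ids of chars
--         pad_tok: the char to pad with
--
--     Returns:
--         a list of lists of lists where each sublist has same length
--
--     """
--     max_length_word = max([max(map(lambda x: len(x), char_ids)) for char_ids in charss_ids])
--     sequence_padded, sequence_length = [], []
--     for chars_ids in charss_ids:
--         # all words are same length now
--         sp, sl = _pad_sequences(chars_ids, pad_tok, max_length_word)
--         sequence_padded.append(sp)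
--         sequence_length.append(sl)
--
--     max_length_sentence = max(map(lambda x: len(x), charss_ids))
--     sequence_padded, _ = _pad_sequences(sequence_padded, [pad_tok] * max_length_word, max_length_sentence)
--     sequence_length, _ = _pad_sequences(sequence_length, 0, max_length_sentence)
--     return sequence_padded, sequence_length
--
-- def _pad_sequences(sequences, pad_tok, max_length):
--     """
--     Args:
--         sequences: a generator of list or tuple
--         pad_tok: the char to pad with
--
--     Returns:
--         a list of list where each sublist has same length
--     """
--     sequence_padded, sequence_length = [], []
--
--     for seq in sequences:
--         seq = list(seq)
--         seq_ = seq[:max_length] + [pad_tok] * max(max_length - len(seq), 0)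
--         sequence_padded.append(seq_)
--         sequence_length.append(min(len(seq), max_length))
--
--     return sequence_padded, sequence_length
-- ===== SOURCE B (Python) =====
-- def pad_chars(charss_ids, pad_tok=0):
--     # Output-shape-driven: iterate over the target rectangle and fill each cell
--     # from the input if present, else with pad_tok.
--     max_length_word = max(len(w) for s in charss_ids for w in s)
--     max_length_sentence = max(len(s) for s in charss_ids)
--     sequence_padded = [
--         [[s[j][k] if j < len(s) and k < len(s[j]) else pad_tok
--           for k in range(max_length_word)]
--          for j in range(max_length_sentence)]
--         for s in charss_ids]
--     sequence_length = [
--         [len(s[j]) if j < len(s) else 0 for j in range(max_length_sentence)]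
--         for s in charss_ids]
--     return sequence_padded, sequence_length
-- ===== Notes on version B (the rewrite author's own statement) =====
-- stated objective: alternative
-- what changed: B is output-shape-driven: it precomputes both maxima, then iterates over the target rectangle with range(max_length_sentence) x range(max_length_word) and fills each cell from the input when in range, else with pad_tok, instead of A's input-driven append-padding passes via _pad_sequences.
import Mathlib
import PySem

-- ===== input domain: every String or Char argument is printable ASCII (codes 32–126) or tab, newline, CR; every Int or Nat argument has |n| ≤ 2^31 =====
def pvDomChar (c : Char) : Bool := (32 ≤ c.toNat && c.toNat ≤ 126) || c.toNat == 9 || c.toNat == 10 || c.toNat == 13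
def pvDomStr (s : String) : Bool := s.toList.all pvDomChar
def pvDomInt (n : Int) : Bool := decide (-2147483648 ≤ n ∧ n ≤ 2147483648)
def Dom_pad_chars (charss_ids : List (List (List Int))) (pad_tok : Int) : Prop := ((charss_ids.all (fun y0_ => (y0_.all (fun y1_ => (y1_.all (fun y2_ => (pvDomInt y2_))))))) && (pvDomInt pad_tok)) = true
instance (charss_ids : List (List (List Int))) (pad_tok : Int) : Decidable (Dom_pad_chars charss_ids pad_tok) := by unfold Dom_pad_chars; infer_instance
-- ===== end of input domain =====

-- B is output-shape-driven: it iterates over the target rectangle (range of sentence slots ×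
-- range of char slots) and fills each cell from the input when present, else with pad_tok,
-- instead of A's append-padding passes (objective: alternative).

-- Python max(xs) on a list of ints (the .getD 0 is a totalisation guard; Pre_ keeps the list nonempty)
def pyMaxInt (xs : List Int) : Int := (PySem.List.max? xs (fun y => y)).getD 0

-- ===== PORT A =====

def padSeqA {α : Type} (sequences : List (List α)) (pad_tok : α) (max_length : Int) :
    List (List α) × List Int :=
  sequences.foldl (fun acc seq =>
    let seq_ := PySem.List.slice seq none (some max_length) ++
      PySem.List.pyRepeat [pad_tok] (max (max_length - (seq.length : Int)) 0)
    (acc.1 ++ [seq_], acc.2 ++ [min ((seq.length : Int)) max_length])) ([], [])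

def pad_chars (charss_ids : List (List (List Int))) (pad_tok : Int) :
    List (List (List Int)) × List (List Int) :=
  let max_length_word :=
    pyMaxInt (charss_ids.map (fun char_ids => pyMaxInt (char_ids.map (fun x => (x.length : Int)))))
  let r := charss_ids.foldl (fun acc chars_ids =>
      let p := padSeqA chars_ids pad_tok max_length_word
      (acc.1 ++ [p.1], acc.2 ++ [p.2]))
      (([], []) : List (List (List Int)) × List (List Int))
  let max_length_sentence := pyMaxInt (charss_ids.map (fun x => (x.length : Int)))
  let sequence_padded :=
    (padSeqA r.1 (PySem.List.pyRepeat [pad_tok] max_length_word) max_length_sentence).1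
  let sequence_length := (padSeqA r.2 (0 : Int) max_length_sentence).1
  (sequence_padded, sequence_length)

-- ===== PORT B =====

def pad_chars_alt (charss_ids : List (List (List Int))) (pad_tok : Int) :
    List (List (List Int)) × List (List Int) :=
  let max_length_word :=
    pyMaxInt (charss_ids.flatMap (fun s => s.map (fun w => (w.length : Int))))
  let max_length_sentence := pyMaxInt (charss_ids.map (fun s => (s.length : Int)))
  let sequence_padded := charss_ids.map (fun s =>
    (PySem.List.pyRange 0 max_length_sentence 1).map (fun j =>
      (PySem.List.pyRange 0 max_length_word 1).map (fun k =>
        if j < (s.length : Int) ∧ k < ((PySem.List.pyGetD s j []).length : Int) then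
          PySem.List.pyGetD (PySem.List.pyGetD s j []) k pad_tok
        else pad_tok)))
  let sequence_length := charss_ids.map (fun s =>
    (PySem.List.pyRange 0 max_length_sentence 1).map (fun j =>
      if j < (s.length : Int) then ((PySem.List.pyGetD s j []).length : Int) else 0))
  (sequence_padded, sequence_length)

-- ===== PRECONDITION & SPEC =====
-- Pre_ excludes exactly the inputs where Python A raises ValueError: an empty input, or an empty sentence
def Pre_pad_chars (charss_ids : List (List (List Int))) (pad_tok : Int) : Prop :=
  charss_ids ≠ [] ∧ ∀ s ∈ charss_ids, s ≠ []
instance (charss_ids : List (List (List Int))) (pad_tok : Int) : Decidable (Pre_pad_chars charss_ids pad_tok) := by unfold Pre_pad_chars; infer_instance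
def pvWitness_pad_chars : List (List (List Int)) × Int := ([[[1], [2, 3]], [[4]]], 0)

def Spec_pad_chars (charss_ids : List (List (List Int))) (pad_tok : Int) (out : List (List (List Int)) × List (List Int)) : Prop := out = pad_chars_alt charss_ids pad_tok
instance (charss_ids : List (List (List Int))) (pad_tok : Int) (out : List (List (List Int)) × List (List Int)) : Decidable (Spec_pad_chars charss_ids pad_tok out) := by unfold Spec_pad_chars; infer_instance

-- ===== CLAIM (what is proved, stated in full; the proofs are below) =====
def Claim_equal_pad_chars : Prop := ∀ (charss_ids : List (List (List Int))) (pad_tok : Int), Dom_pad_chars charss_ids pad_tok → Pre_pad_chars charss_ids pad_tok → Spec_pad_chars charss_ids pad_tok (pad_chars charss_ids pad_tok)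

-- ===== LEMMAS AND PROOFS =====

theorem pyMaxInt_cons (x : Int) (t : List Int) : pyMaxInt (x :: t) = t.foldl max x := by
  simp [pyMaxInt, PySem.List.max?_id_cons]

theorem foldl_max_shift (l : List Int) (a b : Int) :
    l.foldl max (max a b) = max a (l.foldl max b) := by
  induction l generalizing b with
  | nil => rfl
  | cons y t ih =>
    simp only [List.foldl_cons]
    rw [max_assoc, ih]

theorem pyMaxInt_append (l1 l2 : List Int) (h1 : l1 ≠ []) (h2 : l2 ≠ []) :
    pyMaxInt (l1 ++ l2) = max (pyMaxInt l1) (pyMaxInt l2) := by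
  cases l1 with
  | nil => exact absurd rfl h1
  | cons x t =>
    cases l2 with
    | nil => exact absurd rfl h2
    | cons y u =>
      simp only [List.cons_append, pyMaxInt_cons, List.foldl_append, List.foldl_cons]
      rw [foldl_max_shift]

theorem pyMaxInt_singleton (x : Int) : pyMaxInt [x] = x := by
  rw [pyMaxInt_cons]; rfl

theorem le_pyMaxInt (xs : List Int) (y : Int) (hy : y ∈ xs) : y ≤ pyMaxInt xs := by
  cases xs with
  | nil => cases hy
  | cons x t =>
    rw [pyMaxInt_cons]
    rcases List.mem_cons.mp hy with h | h
    · exact h ▸ (PySem.List.le_foldl_max t x).1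
    · exact (PySem.List.le_foldl_max t x).2 y h

-- A's max of per-sentence maxima equals B's max over the flattened length list
theorem maxes_eq (charss : List (List (List Int))) (hne : charss ≠ [])
    (hall : ∀ s ∈ charss, s ≠ []) :
    pyMaxInt (charss.map (fun s => pyMaxInt (s.map (fun w => (w.length : Int))))) =
    pyMaxInt (charss.flatMap (fun s => s.map (fun w => (w.length : Int)))) := by
  induction charss with
  | nil => exact absurd rfl hne
  | cons s t ih =>
    have hs : s ≠ [] := hall s List.mem_cons_self
    have hsm : s.map (fun w => (w.length : Int)) ≠ [] := by
      simpa using hs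
    cases t with
    | nil =>
      simp only [List.map_cons, List.map_nil, List.flatMap_cons, List.flatMap_nil,
        List.append_nil, pyMaxInt_singleton]
    | cons s2 t2 =>
      have htne : (s2 :: t2 : List (List (List Int))) ≠ [] := by simp
      have htall : ∀ x ∈ (s2 :: t2), x ≠ [] := fun x hx => hall x (List.mem_cons_of_mem _ hx)
      have hflatne : (s2 :: t2).flatMap (fun s => s.map (fun w => (w.length : Int))) ≠ [] := by
        have h2 : s2 ≠ [] := htall s2 List.mem_cons_self
        cases s2 with
        | nil => exact absurd rfl h2
        | cons w ws => simp
      have hmapne : (s2 :: t2).map (fun s => pyMaxInt (s.map (fun w => (w.length : Int)))) ≠ [] := by simp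
      rw [show (s :: s2 :: t2).map (fun s => pyMaxInt (s.map (fun w => (w.length : Int)))) =
            [pyMaxInt (s.map (fun w => (w.length : Int)))] ++
            (s2 :: t2).map (fun s => pyMaxInt (s.map (fun w => (w.length : Int)))) from rfl,
          pyMaxInt_append _ _ (by simp) hmapne,
          ih htne htall,
          show (s :: s2 :: t2).flatMap (fun s => s.map (fun w => (w.length : Int))) =
            s.map (fun w => (w.length : Int)) ++
            (s2 :: t2).flatMap (fun s => s.map (fun w => (w.length : Int))) from rfl,
          pyMaxInt_append _ _ hsm hflatne]
      rw [pyMaxInt_singleton]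

-- the pair-accumulator loop of _pad_sequences as two maps
theorem padSeqA_eq {α : Type} (sequences : List (List α)) (pad_tok : α) (m : Int) :
    padSeqA sequences pad_tok m =
      (sequences.map (fun seq => PySem.List.slice seq none (some m) ++
          PySem.List.pyRepeat [pad_tok] (max (m - (seq.length : Int)) 0)),
       sequences.map (fun seq => min ((seq.length : Int)) m)) := by
  unfold padSeqA
  rw [PySem.List.foldl_prod_mk
      (f := fun acc seq => acc ++ [PySem.List.slice seq none (some m) ++
        PySem.List.pyRepeat [pad_tok] (max (m - (seq.length : Int)) 0)])
      (g := fun acc seq => acc ++ [min ((seq.length : Int)) m])]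
  simp only [PySem.List.foldl_append_singleton_eq_map, List.nil_append]

-- take to max-length then pad = pad to max-length (for a list already no longer than m)
theorem take_pad_eq {β : Type} (l : List β) (m : Int) (x : β) (hl : (l.length : Int) ≤ m) :
    List.take m.toNat l ++ List.replicate (max (m - (l.length : Int)) 0).toNat x =
    l ++ List.replicate (m - (l.length : Int)).toNat x := by
  rw [List.take_of_length_le (by omega)]
  congr 2
  omega

-- B's grid-fill over a range, split at the filled prefix
theorem pyRange_fill {β : Type} (n m : Int) (h0 : 0 ≤ m) (hm : m ≤ n)
    (g : Int → β) (d : β) :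
    (PySem.List.pyRange 0 n 1).map (fun j => if j < m then g j else d) =
    (PySem.List.pyRange 0 m 1).map g ++ List.replicate (n - m).toNat d := by
  rw [PySem.List.pyRange_one_append 0 m n h0 hm, List.map_append]
  congr 1
  · apply List.map_congr_left
    intro j hj
    have := (PySem.List.mem_pyRange_one.mp hj)
    simp [this.2]
  · have hlen : (PySem.List.pyRange m n 1).length = (n - m).toNat :=
      PySem.List.length_pyRange_one m n
    calc (PySem.List.pyRange m n 1).map (fun j => if j < m then g j else d)
        = (PySem.List.pyRange m n 1).map (fun _ => d) := by
          apply List.map_congr_left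
          intro j hj
          have := (PySem.List.mem_pyRange_one.mp hj)
          simp [not_lt.mpr this.1]
      _ = List.replicate (n - m).toNat d := by rw [List.map_const', hlen]

-- iterating j over range(len(s)) and reading s[j] is mapping over s
theorem map_over_range_getD {α β : Type} (s : List α) (F : α → β) (d : α) :
    (PySem.List.pyRange 0 ((s.length : Int)) 1).map (fun j => F (PySem.List.pyGetD s j d)) =
    s.map F := by
  rw [show (fun j => F (PySem.List.pyGetD s j d)) = F ∘ (fun j => PySem.List.pyGetD s j d) from rfl,
    ← List.map_map, PySem.List.map_pyGetD_pyRange_zero' s d]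

-- B's padded grid for one sentence, in canonical appended-padding form
theorem grid_padded_eq (s : List (List Int)) (mw ms pad : Int) (hmw0 : 0 ≤ mw)
    (hlen : ((s.length : Int)) ≤ ms) (hws : ∀ w ∈ s, ((w.length : Int)) ≤ mw) :
    (PySem.List.pyRange 0 ms 1).map (fun j =>
      (PySem.List.pyRange 0 mw 1).map (fun k =>
        if j < (s.length : Int) ∧ k < ((PySem.List.pyGetD s j []).length : Int) then
          PySem.List.pyGetD (PySem.List.pyGetD s j []) k pad
        else pad)) =
    s.map (fun w => w ++ List.replicate (mw - (w.length : Int)).toNat pad) ++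
      List.replicate (ms - (s.length : Int)).toNat (List.replicate mw.toNat pad) := by
  have hrow : (fun j =>
      (PySem.List.pyRange 0 mw 1).map (fun k =>
        if j < (s.length : Int) ∧ k < ((PySem.List.pyGetD s j []).length : Int) then
          PySem.List.pyGetD (PySem.List.pyGetD s j []) k pad
        else pad)) =
      (fun j => if j < (s.length : Int) then
        (PySem.List.pyRange 0 mw 1).map (fun k =>
          if k < ((PySem.List.pyGetD s j []).length : Int) then
            PySem.List.pyGetD (PySem.List.pyGetD s j []) k pad
          else pad)
        else List.replicate mw.toNat pad) := by
    funext j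
    by_cases hj : j < (s.length : Int)
    · simp only [hj, true_and, if_true]
    · simp only [hj, false_and, if_false]
      rw [List.map_const', PySem.List.length_pyRange_one]
      congr 1
      omega
  rw [hrow, pyRange_fill ms ((s.length : Int)) (by positivity) hlen _ _]
  congr 1
  rw [map_over_range_getD s
    (fun w => (PySem.List.pyRange 0 mw 1).map (fun k =>
      if k < ((w.length : Int)) then PySem.List.pyGetD w k pad else pad)) []]
  apply List.map_congr_left
  intro w hw
  have hwle := hws w hw
  rw [pyRange_fill mw ((w.length : Int)) (by positivity) hwle _ _,
    PySem.List.map_pyGetD_pyRange_zero' w pad]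

-- B's lengths row for one sentence, in canonical form
theorem grid_lengths_eq (s : List (List Int)) (ms : Int)
    (hlen : ((s.length : Int)) ≤ ms) :
    (PySem.List.pyRange 0 ms 1).map (fun j =>
      if j < (s.length : Int) then ((PySem.List.pyGetD s j []).length : Int) else 0) =
    s.map (fun w => ((w.length : Int))) ++ List.replicate (ms - (s.length : Int)).toNat 0 := by
  rw [pyRange_fill ms ((s.length : Int)) (by positivity) hlen _ _]
  congr 1
  exact map_over_range_getD s (fun w => ((w.length : Int))) []

-- ===== VERDICT (by name: the statement is the Claim_ definition above) =====
theorem pad_chars_spec : Claim_equal_pad_chars := by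
  intro charss pad _ hpre
  obtain ⟨hne, hall⟩ := hpre
  unfold Spec_pad_chars pad_chars pad_chars_alt
  dsimp only
  rw [maxes_eq charss hne hall]
  set mw := pyMaxInt (charss.flatMap (fun s => s.map (fun w => (w.length : Int)))) with hmw
  set ms := pyMaxInt (charss.map (fun s => (s.length : Int))) with hms
  have hmw0 : 0 ≤ mw := by
    obtain ⟨s, hs⟩ := List.exists_mem_of_ne_nil charss hne
    obtain ⟨w, hw⟩ := List.exists_mem_of_ne_nil s (hall s hs)
    have : ((w.length : Int)) ≤ mw := le_pyMaxInt _ _ (by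
      simp only [List.mem_flatMap, List.mem_map]
      exact ⟨s, hs, w, hw, rfl⟩)
    omega
  rw [PySem.List.foldl_prod_mk
      (f := fun acc s => acc ++ [(padSeqA s pad mw).1])
      (g := fun acc s => acc ++ [(padSeqA s pad mw).2])]
  simp only [PySem.List.foldl_append_singleton_eq_map, List.nil_append, padSeqA_eq, List.map_map]
  refine Prod.ext ?_ ?_ <;> apply List.map_congr_left <;> intro s hs <;>
    have hlen : ((s.length : Int)) ≤ ms := le_pyMaxInt _ _ (List.mem_map.mpr ⟨s, hs, rfl⟩) <;>
    have hws : ∀ w ∈ s, ((w.length : Int)) ≤ mw := fun w hw => le_pyMaxInt _ _ (by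
      simp only [List.mem_flatMap, List.mem_map]
      exact ⟨s, hs, w, hw, rfl⟩)
  · -- padded component
    simp only [Function.comp_apply, PySem.List.pyRepeat_singleton]
    rw [PySem.List.slice_to _ (by omega), take_pad_eq _ _ _ (by simp only [List.length_map]; omega)]
    rw [grid_padded_eq s mw ms pad hmw0 hlen hws]
    congr 1
    · apply List.map_congr_left
      intro w hw
      rw [PySem.List.slice_to _ hmw0, take_pad_eq _ _ _ (hws w hw)]
    · simp only [List.length_map]
  · -- lengths component
    simp only [Function.comp_apply, PySem.List.pyRepeat_singleton]
    rw [PySem.List.slice_to _ (by omega), take_pad_eq _ _ _ (by simp only [List.length_map]; omega)]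
    rw [grid_lengths_eq s ms hlen]
    congr 1
    · apply List.map_congr_left
      intro w hw
      exact min_eq_left (hws w hw)
    · simp only [List.length_map]
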